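-- pv_equiv track=rewrite | github.com/n00py/youglish-korean-context-grabber | corpus/text.py | split_search_tokens
-- ===== SOURCE A (Python) =====
-- def split_search_tokens(query: str) -> list[str]:
--     pieces = []
--     current = []
--     for character in query:
--         if character.isalnum() or "\uac00" <= character <= "\ud7a3":
--             current.append(character.lower())
--             continue
--         if current:
--             pieces.append("".join(current))
--             current = []
--     if current:
--         pieces.append("".join(current))
--     return pieces
-- ===== SOURCE B (Python) =====
-- def split_search_tokens(query: str) -> list[str]:
--     def is_tok(c):
--         return c.isalnum() or "\uac00" <= c <= "\ud7a3"
--     tokens = []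
--     i, n = 0, len(query)
--     while i < n:
--         if is_tok(query[i]):
--             j = i
--             while j < n and is_tok(query[j]):
--                 j += 1
--             tokens.append(query[i:j].lower())
--             i = j
--         else:
--             i += 1
--     return tokens
-- ===== Notes on version B (the rewrite author's own statement) =====
-- stated objective: alternative
-- what changed: Replaces A's per-character accumulate-and-flush buffer with a two-pointer index scan that finds each maximal token run with an inner scan, slices it out and lowercases the slice at once; no current-buffer or final-flush logic remains.
import Mathlib
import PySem

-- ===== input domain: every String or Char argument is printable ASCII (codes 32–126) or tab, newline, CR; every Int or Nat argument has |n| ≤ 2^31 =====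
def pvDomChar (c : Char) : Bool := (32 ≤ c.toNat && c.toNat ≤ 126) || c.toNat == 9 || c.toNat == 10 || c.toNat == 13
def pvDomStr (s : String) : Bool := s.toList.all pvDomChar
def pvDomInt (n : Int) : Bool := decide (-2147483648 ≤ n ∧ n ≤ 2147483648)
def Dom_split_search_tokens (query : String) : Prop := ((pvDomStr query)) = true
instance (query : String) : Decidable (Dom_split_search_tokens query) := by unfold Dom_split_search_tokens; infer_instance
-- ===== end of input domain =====

-- B replaces A's accumulate-and-flush character buffer with a run scan (take/skip maximal runs).

-- shared helper: the token-character predicate both Pythons use verbatim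
-- (isalnum, or a Hangul-syllable codepoint; exact on all of Unicode)
def tokChar (c : Char) : Bool :=
  PySem.Chars.isalnum c || (0xAC00 ≤ c.toNat && c.toNat ≤ 0xD7A3)

-- ===== PORT A =====
-- the for-loop over the characters, carrying (pieces, current); the after-loop
-- flush of `current` is the base case of the recursion
def loopA : List Char → List String → List Char → List String
  | [], pieces, current =>
      if current ≠ [] then pieces ++ [String.ofList current] else pieces
  | ch :: rest, pieces, current =>
      if tokChar ch then loopA rest pieces (current ++ [PySem.Chars.lowerChar ch])
      else if current ≠ [] then loopA rest (pieces ++ [String.ofList current]) []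
      else loopA rest pieces current

def split_search_tokens (query : String) : List String :=
  loopA query.toList [] []

-- ===== PORT B =====
-- two-pointer scan: at a token character take the maximal run, slice-lower it,
-- and continue after the run; at a non-token character advance one position
def scanB : List Char → List String
  | [] => []
  | c :: rest =>
      if tokChar c then
        String.ofList (PySem.Chars.lower (c :: rest.takeWhile tokChar))
          :: scanB (rest.dropWhile tokChar)
      else scanB rest
termination_by l => l.length
decreasing_by
  · exact Nat.lt_succ_of_le (List.length_dropWhile_le _ _)
  · simp

def split_search_tokens_alt (query : String) : List String :=
  scanB query.toList

-- ===== PRECONDITION & SPEC =====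
def Spec_split_search_tokens (query : String) (out : List String) : Prop := out = split_search_tokens_alt query
instance (query : String) (out : List String) : Decidable (Spec_split_search_tokens query out) := by unfold Spec_split_search_tokens; infer_instance

-- ===== CLAIM (what is proved, stated in full; the proofs are below) =====
def Claim_equal_split_search_tokens : Prop := ∀ (query : String), Dom_split_search_tokens query → Spec_split_search_tokens query (split_search_tokens query)

-- ===== LEMMAS AND PROOFS =====

-- `pieces` only accumulates at the front of the result
theorem loopA_pieces (l : List Char) : ∀ (pieces : List String) (cur : List Char),
    loopA l pieces cur = pieces ++ loopA l [] cur := by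
  induction l with
  | nil =>
    intro pieces cur
    by_cases h : cur = [] <;> simp [loopA, h]
  | cons c rest ih =>
    intro pieces cur
    by_cases ht : tokChar c
    · simp [loopA, ht]; rw [ih]
    · by_cases hc : cur = []
      · simp [loopA, ht, hc]; rw [ih]
      · simp [loopA, ht, hc]
        rw [ih (pieces ++ [String.ofList cur]) [], ih [String.ofList cur] []]
        simp

-- main invariant: the loop from an empty buffer computes the run decomposition,
-- and from a non-empty buffer the buffer extends the first run
theorem loopA_eq_scanB (l : List Char) :
    loopA l [] [] = scanB l ∧
    ∀ cur : List Char, cur ≠ [] →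
      loopA l [] cur =
        String.ofList (cur ++ (l.takeWhile tokChar).map PySem.Chars.lowerChar)
          :: scanB (l.dropWhile tokChar) := by
  induction l with
  | nil =>
    refine ⟨by simp [loopA, scanB], ?_⟩
    intro cur hc
    simp [loopA, hc, scanB]
  | cons c rest ih =>
    by_cases ht : tokChar c
    · constructor
      · rw [show loopA (c :: rest) [] [] = loopA rest [] [PySem.Chars.lowerChar c] by
            simp [loopA, ht]]
        rw [ih.2 [PySem.Chars.lowerChar c] (by simp)]
        simp [scanB, ht, PySem.Chars.lower]
      · intro cur hc
        rw [show loopA (c :: rest) [] cur = loopA rest [] (cur ++ [PySem.Chars.lowerChar c]) by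
            simp [loopA, ht]]
        rw [ih.2 _ (by simp)]
        simp [ht]
    · constructor
      · rw [show loopA (c :: rest) [] [] = loopA rest [] [] by simp [loopA, ht]]
        rw [ih.1, scanB]
        simp [ht]
      · intro cur hc
        rw [show loopA (c :: rest) [] cur = loopA rest [String.ofList cur] [] by
            simp [loopA, ht, hc]]
        rw [loopA_pieces, ih.1]
        simp [ht, scanB]

-- ===== VERDICT (by name: the statement is the Claim_ definition above) =====
theorem split_search_tokens_spec : Claim_equal_split_search_tokens := by
  intro query _
  unfold Spec_split_search_tokens split_search_tokens split_search_tokens_alt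
  exact (loopA_eq_scanB query.toList).1
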